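-- pv_equiv track=rewrite | github.com/foxxfiles/Texas-Hold-em-Probability-Calculator | ppoker.py | extract_recommendation
-- ===== SOURCE A (Python) =====
-- def extract_recommendation(text):
--     """Extrae la recomendación principal de un texto de consejo"""
--     # Implementación simple: tomar la última oración o buscar frases clave
--     sentences = text.split('.')
--     if sentences:
--         for sentence in reversed(sentences):
--             if "recomend" in sentence.lower() or "deberías" in sentence.lower() or "sugiero" in sentence.lower():
--                 return sentence.strip() + "."
--         # Si no encontramos frases clave, devolver la última oración con contenido
--         for sentence in reversed(sentences):
--             if len(sentence.strip()) > 10: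
--                 return sentence.strip() + "."
--     return text
-- ===== SOURCE B (Python) =====
-- def extract_recommendation(text):
--     """Extrae la recomendación principal de un texto de consejo"""
--     # Single reversed pass: return immediately on a keyword sentence,
--     # remember the first long sentence as a fallback.
--     fallback = None
--     for sentence in reversed(text.split('.')):
--         low = sentence.lower()
--         if "recomend" in low or "deberías" in low or "sugiero" in low:
--             return sentence.strip() + "."
--         if fallback is None and len(sentence.strip()) > 10:
--             fallback = sentence
--     if fallback is not None:
--         return fallback.strip() + "."
--     return text
-- ===== Notes on version B (the rewrite author's own statement) =====
-- stated objective: simpler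
-- what changed: Replaces A's two separate reversed scans (keyword pass, then length-fallback pass) and the vacuous 'if sentences:' guard with one reversed pass that returns on a keyword hit and records the first long sentence as a fallback, computing sentence.lower() once per sentence.
import Mathlib
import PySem

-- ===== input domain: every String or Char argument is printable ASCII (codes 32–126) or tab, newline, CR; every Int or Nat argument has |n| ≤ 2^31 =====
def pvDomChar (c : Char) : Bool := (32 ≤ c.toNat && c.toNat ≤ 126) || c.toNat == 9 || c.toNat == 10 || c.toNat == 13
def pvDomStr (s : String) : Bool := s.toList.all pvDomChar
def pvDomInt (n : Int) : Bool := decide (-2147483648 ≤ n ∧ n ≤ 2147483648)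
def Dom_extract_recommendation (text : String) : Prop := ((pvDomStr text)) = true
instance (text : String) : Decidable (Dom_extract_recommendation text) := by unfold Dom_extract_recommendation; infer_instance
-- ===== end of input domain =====

-- B replaces A's two reversed scans with one reversed pass (keyword return, first-long-sentence fallback); objective: simpler.

-- ===== PORT A =====
-- for-with-return over reversed(sentences) is a first-match scan: List.find? on the reversed list
def extract_recommendation (text : String) : String :=
  let sentences := (PySem.Str.split? text ".").getD []
  if sentences.isEmpty then text
  else
    match sentences.reverse.find? (fun sentence =>
        PySem.Str.isIn "recomend" (PySem.Str.lower sentence) ||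
        PySem.Str.isIn "deberías" (PySem.Str.lower sentence) ||
        PySem.Str.isIn "sugiero" (PySem.Str.lower sentence)) with
    | some sentence => PySem.Str.strip sentence ++ "."
    | none =>
      match sentences.reverse.find? (fun sentence =>
          10 < PySem.Str.len (PySem.Str.strip sentence)) with
      | some sentence => PySem.Str.strip sentence ++ "."
      | none => text

-- ===== PORT B =====
def pvHasKeyword (low : String) : Bool :=
  PySem.Str.isIn "recomend" low || PySem.Str.isIn "deberías" low || PySem.Str.isIn "sugiero" low

-- the single reversed pass of Source B: early return on keyword, else record first fallback
def pvBLoop (text : String) : List String → Option String → String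
  | [], none => text
  | [], some fb => PySem.Str.strip fb ++ "."
  | sentence :: rest, fb =>
    if pvHasKeyword (PySem.Str.lower sentence) then PySem.Str.strip sentence ++ "."
    else pvBLoop text rest
      (if fb.isNone && decide (10 < PySem.Str.len (PySem.Str.strip sentence)) then some sentence else fb)

def extract_recommendation_alt (text : String) : String :=
  pvBLoop text ((PySem.Str.split? text ".").getD []).reverse none

-- ===== PRECONDITION & SPEC =====
def Spec_extract_recommendation (text : String) (out : String) : Prop := out = extract_recommendation_alt text
instance (text : String) (out : String) : Decidable (Spec_extract_recommendation text out) := by unfold Spec_extract_recommendation; infer_instance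

-- ===== CLAIM (what is proved, stated in full; the proofs are below) =====
def Claim_equal_extract_recommendation : Prop := ∀ (text : String), Dom_extract_recommendation text → Spec_extract_recommendation text (extract_recommendation text)

-- ===== LEMMAS AND PROOFS =====

-- B's one-pass loop = keyword scan, then the fallback, then the long-sentence scan
theorem pvBLoop_eq (text : String) (l : List String) (fb : Option String) :
    pvBLoop text l fb =
      match l.find? (fun s => pvHasKeyword (PySem.Str.lower s)) with
      | some s => PySem.Str.strip s ++ "."
      | none =>
        match fb with
        | some f => PySem.Str.strip f ++ "."
        | none =>
          match l.find? (fun s => decide (10 < PySem.Str.len (PySem.Str.strip s))) with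
          | some s => PySem.Str.strip s ++ "."
          | none => text := by
  induction l generalizing fb with
  | nil => cases fb <;> rfl
  | cons s rest ih =>
    by_cases hk : pvHasKeyword (PySem.Str.lower s)
    · simp [pvBLoop, hk, List.find?]
    · by_cases hl : 10 < (PySem.Chars.strip s.toList).length
      · cases fb with
        | none => simp [pvBLoop, hk, hl, List.find?, ih]
        | some f => simp [pvBLoop, hk, List.find?, ih]
      · cases fb with
        | none => simp [pvBLoop, hk, hl, List.find?, ih]
        | some f => simp [pvBLoop, hk, List.find?, ih]

-- ===== VERDICT (by name: the statement is the Claim_ definition above) =====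
theorem extract_recommendation_spec : Claim_equal_extract_recommendation := by
  intro text _
  unfold Spec_extract_recommendation extract_recommendation extract_recommendation_alt
  rw [pvBLoop_eq]
  by_cases he : ((PySem.Str.split? text ".").getD []).isEmpty
  · have : ((PySem.Str.split? text ".").getD []).reverse = [] := by
      simpa [List.isEmpty_iff] using he
    simp [he, this]
  · simp [he, pvHasKeyword]
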